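-- pv_equiv track=rewrite | github.com/mjojic/CSE574 | pydpocl/domain/strips_pddl.py | _groundings_for_params
-- ===== SOURCE A (Python) =====
-- import itertools
--
-- def _is_subtype(child_type: str, required_type: str, hierarchy: dict[str, str]) -> bool:
--     """Return True if *child_type* is equal to or a subtype of *required_type*."""
--     child_type = child_type.lower()
--     required_type = required_type.lower()
--     if required_type == "object":
--         return True
--     current = child_type
--     visited: set[str] = set()
--     while current not in visited:
--         if current == required_type:
--             return True
--         visited.add(current)
--         current = hierarchy.get(current, "object")
--     return False
--
-- def _groundings_for_params(
--     params: list[tuple[str, str]],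
--     typed_objects: list[tuple[str, str]],
--     type_hierarchy: dict[str, str],
-- ) -> list[dict[str, str]]:
--     """Generate all type-compatible ground substitutions for *params*.
--
--     For each parameter only objects whose type is a subtype of (or equal to)
--     the parameter's declared type are considered.  For untyped domains all
--     objects default to type ``"object"`` and therefore match every parameter.
--
--     Returns a list of substitution dicts ``{varname: object_name}``.
--     """
--     if not params:
--         return [{}]
--
--     candidates: list[list[str]] = []
--     for _varname, param_type in params:
--         compatible = [
--             obj_name
--             for obj_name, obj_type in typed_objects
--             if _is_subtype(obj_type, param_type, type_hierarchy)
--         ]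
--         if not compatible:
--             return []
--         candidates.append(compatible)
--
--     result: list[dict[str, str]] = []
--     for combo in itertools.product(*candidates):
--         subst = {varname: obj for (varname, _), obj in zip(params, combo)}
--         result.append(subst)
--     return result
-- ===== SOURCE B (Python) =====
-- def _groundings_for_params(params, typed_objects, type_hierarchy):
--     # Precompute each object type's ancestor-closure once, then ground by
--     # depth-first recursion over the parameter list (no candidate matrix,
--     # no itertools.product, no zip, no per-pair chain walk).
--     def ancestors(t):
--         chain = set()
--         cur = t.lower()
--         while cur not in chain:
--             chain.add(cur)
--             cur = type_hierarchy.get(cur, "object")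
--         return chain
--
--     anc = {}
--     for _name, obj_type in typed_objects:
--         if obj_type not in anc:
--             anc[obj_type] = ancestors(obj_type)
--
--     def compatible(param_type):
--         r = param_type.lower()
--         return [name for name, obj_type in typed_objects
--                 if r == "object" or r in anc[obj_type]]
--
--     def ground(ps, subst):
--         if not ps:
--             return [subst]
--         (v, t), rest = ps[0], ps[1:]
--         return [g for obj in compatible(t) for g in ground(rest, {**subst, v: obj})]
--
--     return ground(params, {})
-- ===== Notes on version B (the rewrite author's own statement) =====
-- stated objective: alternative
-- what changed: B replaces A's per-pair chain-walk subtype test and candidate-matrix + itertools.product + zip enumeration by (1) an ancestor-closure set per object type, precomputed once into a dict so compatibility is a membership test, and (2) a depth-first recursion over the parameter list that threads the partial substitution dict down and needs no early empty-candidate return.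
import Mathlib
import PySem

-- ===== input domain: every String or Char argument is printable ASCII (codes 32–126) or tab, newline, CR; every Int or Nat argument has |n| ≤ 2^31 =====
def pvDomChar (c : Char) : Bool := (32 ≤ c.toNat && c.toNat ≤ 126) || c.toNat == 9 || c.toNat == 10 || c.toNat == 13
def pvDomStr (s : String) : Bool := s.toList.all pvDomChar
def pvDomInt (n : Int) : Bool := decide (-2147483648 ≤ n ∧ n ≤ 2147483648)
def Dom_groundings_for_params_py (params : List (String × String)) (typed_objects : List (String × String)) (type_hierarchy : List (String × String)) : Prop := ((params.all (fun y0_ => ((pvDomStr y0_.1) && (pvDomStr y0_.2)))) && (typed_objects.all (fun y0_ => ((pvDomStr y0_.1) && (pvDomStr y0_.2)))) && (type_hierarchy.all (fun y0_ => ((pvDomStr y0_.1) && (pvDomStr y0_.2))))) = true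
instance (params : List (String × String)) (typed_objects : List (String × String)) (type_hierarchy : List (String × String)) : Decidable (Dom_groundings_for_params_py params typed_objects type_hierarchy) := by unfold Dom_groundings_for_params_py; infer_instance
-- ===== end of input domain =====

-- B precomputes an ancestor-closure set per object type (one dict, built once) and grounds by
-- depth-first recursion over the parameter list (objective: alternative — no candidate matrix,
-- no itertools.product, no zip, no per-pair chain walk).

-- ===== PORT A =====
-- hierarchy.get(current, "object")  (hierarchy is a dict ported as an assoc list; first match)
def pvHierGet (hier : List (String × String)) (k : String) : String :=
  match hier.lookup k with
  | some v => v
  | none => "object"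

-- the while loop of _is_subtype; each iteration adds the (fresh) current to visited and every
-- current lies in {lower child, "object"} ∪ hierarchy.values, so fuel = hier.length + 3
-- strictly exceeds the possible number of iterations and the 0-fuel branch is unreachable:
-- the fuel-based recursion is exact on all inputs.
def pvSubLoop (required : String) (hier : List (String × String)) : Nat → String → PySem.Set String → Bool
  | 0, _, _ => false
  | fuel + 1, current, visited =>
    if PySem.Set.contains visited current then false
    else if current == required then true
    else pvSubLoop required hier fuel (pvHierGet hier current) (PySem.Set.add visited current)

def pvIsSubtype (child_type : String) (required_type : String) (hier : List (String × String)) : Bool :=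
  let c := PySem.Str.lower child_type
  let r := PySem.Str.lower required_type
  if r == "object" then true
  else pvSubLoop r hier (hier.length + 3) c PySem.Set.empty

-- A's comprehension: [obj_name for obj_name, obj_type in typed_objects if _is_subtype(...)]
def pvCompatible (param_type : String) (typed_objects : List (String × String)) (hier : List (String × String)) : List String :=
  typed_objects.filterMap (fun p => if pvIsSubtype p.2 param_type hier then some p.1 else none)

-- the candidates loop of A: 'some' = the accumulated candidates list, 'none' = the early 'return []'
def pvCandidates (typed_objects : List (String × String)) (hier : List (String × String)) : List (String × String) → Option (List (List String))
  | [] => some []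
  | (_, t) :: rest =>
    let c := pvCompatible t typed_objects hier
    if c.isEmpty then none
    else (pvCandidates typed_objects hier rest).map (c :: ·)

-- itertools.product over a list of pools (first pool varies slowest)
def pvProduct : List (List String) → List (List String)
  | [] => [[]]
  | c :: rest => c.flatMap (fun x => (pvProduct rest).map (x :: ·))

-- {varname: obj for (varname, _), obj in zip(params, combo)}
def pvSubstFrom (d : PySem.Dict String String) (params : List (String × String)) (combo : List String) : PySem.Dict String String :=
  (params.zip combo).foldl (fun d p => d.insert p.1.1 p.2) d

def groundings_for_params_py (params : List (String × String)) (typed_objects : List (String × String)) (type_hierarchy : List (String × String)) : List (List (String × String)) :=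
  if params.isEmpty then [[]]
  else
    match pvCandidates typed_objects type_hierarchy params with
    | none => []
    | some cands =>
      (pvProduct cands).map (fun combo => (pvSubstFrom PySem.Dict.empty params combo).items)

-- ===== PORT B =====
-- B's ancestors(t): the while loop collecting the chain set; same fuel argument as pvSubLoop —
-- the 0-fuel branch is unreachable, so the fuel recursion is exact.
def pvAncLoop (hier : List (String × String)) : Nat → String → PySem.Set String → PySem.Set String
  | 0, _, chain => chain
  | fuel + 1, cur, chain =>
    if PySem.Set.contains chain cur then chain
    else pvAncLoop hier fuel (pvHierGet hier cur) (PySem.Set.add chain cur)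

def pvAncestors (hier : List (String × String)) (t : String) : PySem.Set String :=
  pvAncLoop hier (hier.length + 3) (PySem.Str.lower t) PySem.Set.empty

-- B's 'anc' cache: anc[obj_type] = ancestors(obj_type) for each obj_type seen in typed_objects
def pvAncMap (hier : List (String × String)) (typed_objects : List (String × String)) : PySem.Dict String (PySem.Set String) :=
  typed_objects.foldl
    (fun d p => if d.contains p.2 then d else d.insert p.2 (pvAncestors hier p.2)) PySem.Dict.empty

-- B's compatible(param_type); anc[obj_type] cannot miss (every obj_type of typed_objects is a
-- key of anc), so getD with an empty default is exact here
def pvCompatB (anc : PySem.Dict String (PySem.Set String)) (typed_objects : List (String × String)) (param_type : String) : List String :=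
  let r := PySem.Str.lower param_type
  typed_objects.filterMap
    (fun p => if r == "object" || PySem.Set.contains (anc.getD p.2 PySem.Set.empty) r then some p.1 else none)

-- B's ground(ps, subst): DFS over the parameter list
def pvGround (anc : PySem.Dict String (PySem.Set String)) (typed_objects : List (String × String)) : List (String × String) → PySem.Dict String String → List (PySem.Dict String String)
  | [], subst => [subst]
  | (v, t) :: rest, subst =>
    (pvCompatB anc typed_objects t).flatMap (fun obj => pvGround anc typed_objects rest (subst.insert v obj))

def groundings_for_params_py_alt (params : List (String × String)) (typed_objects : List (String × String)) (type_hierarchy : List (String × String)) : List (List (String × String)) :=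
  (pvGround (pvAncMap type_hierarchy typed_objects) typed_objects params PySem.Dict.empty).map (·.items)

-- ===== PRECONDITION & SPEC =====
def Spec_groundings_for_params_py (params : List (String × String)) (typed_objects : List (String × String)) (type_hierarchy : List (String × String)) (out : List (List (String × String))) : Prop := out = groundings_for_params_py_alt params typed_objects type_hierarchy
instance (params : List (String × String)) (typed_objects : List (String × String)) (type_hierarchy : List (String × String)) (out : List (List (String × String))) : Decidable (Spec_groundings_for_params_py params typed_objects type_hierarchy out) := by unfold Spec_groundings_for_params_py; infer_instance

-- ===== CLAIM (what is proved, stated in full; the proofs are below) =====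
def Claim_equal_groundings_for_params_py : Prop := ∀ (params : List (String × String)) (typed_objects : List (String × String)) (type_hierarchy : List (String × String)), Dom_groundings_for_params_py params typed_objects type_hierarchy → Spec_groundings_for_params_py params typed_objects type_hierarchy (groundings_for_params_py params typed_objects type_hierarchy)

-- ===== LEMMAS AND PROOFS =====

-- pvAncLoop only grows the chain set
theorem pvAncLoop_mono (hier : List (String × String)) :
    ∀ (fuel : Nat) (cur : String) (chain : PySem.Set String) (x : String),
      x ∈ chain → x ∈ pvAncLoop hier fuel cur chain := by
  intro fuel
  induction fuel with
  | zero => intro cur chain x hx; exact hx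
  | succ n ih =>
    intro cur chain x hx
    rw [pvAncLoop]
    split
    · exact hx
    · exact ih _ _ x ((PySem.Set.mem_add _ _ _).mpr (Or.inl hx))

-- A's visited walk decides membership of req in B's chain set (as long as req is not yet visited)
theorem pvSubLoop_eq_contains_ancLoop (req : String) (hier : List (String × String)) :
    ∀ (fuel : Nat) (cur : String) (visited : PySem.Set String),
      req ∉ visited →
      pvSubLoop req hier fuel cur visited =
        PySem.Set.contains (pvAncLoop hier fuel cur visited) req := by
  intro fuel
  induction fuel with
  | zero =>
    intro cur visited h
    rw [pvSubLoop, pvAncLoop]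
    exact (Bool.eq_false_iff.mpr (fun hc => h ((PySem.Set.contains_iff _ _).mp hc))).symm
  | succ n ih =>
    intro cur visited h
    rw [pvSubLoop, pvAncLoop]
    by_cases hv : PySem.Set.contains visited cur = true
    · rw [if_pos hv, if_pos hv]
      exact (Bool.eq_false_iff.mpr (fun hc => h ((PySem.Set.contains_iff _ _).mp hc))).symm
    · rw [if_neg hv, if_neg hv]
      by_cases hc : cur = req
      · rw [if_pos (by simp [hc])]
        subst hc
        have hmem : cur ∈ PySem.Set.add visited cur := (PySem.Set.mem_add _ _ _).mpr (Or.inr rfl)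
        exact ((PySem.Set.contains_iff _ _).mpr (pvAncLoop_mono hier n _ _ _ hmem)).symm
      · rw [if_neg (by simp [hc])]
        exact ih _ _ (fun hm => by
          rcases (PySem.Set.mem_add _ _ _).mp hm with hm' | he
          · exact h hm'
          · exact hc he.symm)

-- A's subtype test = B's closure-membership test
theorem pvIsSubtype_eq (ot pt : String) (hier : List (String × String)) :
    pvIsSubtype ot pt hier =
      (PySem.Str.lower pt == "object" || PySem.Set.contains (pvAncestors hier ot) (PySem.Str.lower pt)) := by
  by_cases h : (PySem.Str.lower pt == "object") = true
  · simp [pvIsSubtype, pvAncestors, h]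
  · simp only [pvIsSubtype, pvAncestors]
    rw [if_neg h, Bool.eq_false_iff.mpr h, Bool.false_or]
    exact pvSubLoop_eq_contains_ancLoop _ hier _ _ PySem.Set.empty (by simp [PySem.Set.empty])

-- B's anc cache looks up exactly pvAncestors for every type that occurs in typed_objects
theorem pvAncMap_getD (hier : List (String × String)) :
    ∀ (l : List (String × String)) (d : PySem.Dict String (PySem.Set String))
      (hinv : ∀ k, d.contains k = true → d.getD k PySem.Set.empty = pvAncestors hier k)
      (ot : String)
      (hot : ot ∈ l.map Prod.snd ∨ d.contains ot = true),
      (l.foldl (fun d p => if d.contains p.2 then d else d.insert p.2 (pvAncestors hier p.2)) d).getD ot PySem.Set.empty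
        = pvAncestors hier ot := by
  intro l
  induction l with
  | nil =>
    intro d hinv ot hot
    simp only [List.foldl_nil]
    exact hinv ot (by simpa using hot)
  | cons p rest ih =>
    intro d hinv ot hot
    simp only [List.foldl_cons]
    by_cases hd : d.contains p.2 = true
    · simp only [hd, if_true]
      apply ih d hinv ot
      rcases hot with hm | hc
      · rcases (by simpa using hm : ot = p.2 ∨ ot ∈ rest.map Prod.snd) with he | hr
        · exact Or.inr (he ▸ hd)
        · exact Or.inl hr
      · exact Or.inr hc
    · simp only [hd, if_false, Bool.false_eq_true]
      apply ih (d.insert p.2 (pvAncestors hier p.2))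
      · intro k hk
        by_cases hke : k = p.2
        · subst hke
          simp [PySem.Dict.getD_eq_get?_getD, PySem.Dict.get?_insert_self]
        · rw [PySem.Dict.getD_eq_get?_getD, PySem.Dict.get?_insert_of_ne _ _ hke]
          rw [PySem.Dict.contains_insert] at hk
          have : d.contains k = true := by
            rcases (by simpa using hk) with h | h
            · exact absurd h hke
            · exact h
          rw [← PySem.Dict.getD_eq_get?_getD]
          exact hinv k this
      · rcases hot with hm | hc
        · rcases (by simpa using hm : ot = p.2 ∨ ot ∈ rest.map Prod.snd) with he | hr
          · exact Or.inr (by simp [he])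
          · exact Or.inl hr
        · exact Or.inr (by simp [PySem.Dict.contains_insert, hc])

-- A's compatible list = B's compatible list
theorem pvCompat_eq (t : String) (to_ hier : List (String × String)) :
    pvCompatible t to_ hier = pvCompatB (pvAncMap hier to_) to_ t := by
  unfold pvCompatible pvCompatB
  apply List.filterMap_congr
  intro p hp
  rw [pvIsSubtype_eq]
  have : (pvAncMap hier to_).getD p.2 PySem.Set.empty = pvAncestors hier p.2 := by
    unfold pvAncMap
    apply pvAncMap_getD hier to_ PySem.Dict.empty
    · intro k hk; simp [PySem.Dict.contains_empty] at hk
    · exact Or.inl (List.mem_map_of_mem hp)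
  rw [this]

theorem pvSubstFrom_cons (d : PySem.Dict String String) (v t x : String)
    (ps : List (String × String)) (cs : List String) :
    pvSubstFrom d ((v, t) :: ps) (x :: cs) = pvSubstFrom (d.insert v x) ps cs := rfl

-- B's DFS computes A's product-then-zip pipeline over B's compatible lists
theorem pvGround_eq (anc : PySem.Dict String (PySem.Set String)) (to_ : List (String × String)) :
    ∀ (ps : List (String × String)) (d : PySem.Dict String String),
      pvGround anc to_ ps d =
        (pvProduct (ps.map (fun p => pvCompatB anc to_ p.2))).map (fun combo => pvSubstFrom d ps combo) := by
  intro ps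
  induction ps with
  | nil => intro d; simp [pvGround, pvProduct, pvSubstFrom]
  | cons p rest ih =>
    intro d
    obtain ⟨v, t⟩ := p
    simp only [pvGround, ih, List.map_cons, pvProduct, List.map_flatMap, List.map_map, Function.comp_def, pvSubstFrom_cons]

-- A's early-return candidates pipeline collapses to the plain product of the compatible lists
theorem pvCandidates_product (to_ hier : List (String × String)) :
    ∀ (ps : List (String × String)),
      (match pvCandidates to_ hier ps with
       | none => ([] : List (List String))
       | some cs => pvProduct cs) =
        pvProduct (ps.map (fun p => pvCompatible p.2 to_ hier)) := by
  intro ps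
  induction ps with
  | nil => simp [pvCandidates, pvProduct]
  | cons p rest ih =>
    obtain ⟨v, t⟩ := p
    by_cases hc : (pvCompatible t to_ hier).isEmpty = true
    · have he : pvCompatible t to_ hier = [] := by simpa [List.isEmpty_iff] using hc
      simp [pvCandidates, pvProduct, he]
    · simp only [pvCandidates, List.map_cons]
      rw [if_neg hc]
      cases h : pvCandidates to_ hier rest with
      | none =>
        have hz : pvProduct (rest.map (fun p => pvCompatible p.2 to_ hier)) = [] := by
          rw [← ih, h]
        simp [pvProduct, hz]
      | some cs =>
        have hz : pvProduct cs = pvProduct (rest.map (fun p => pvCompatible p.2 to_ hier)) := by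
          rw [← ih, h]
        simp [pvProduct, hz]

-- ===== VERDICT (by name: the statement is the Claim_ definition above) =====
theorem groundings_for_params_py_spec : Claim_equal_groundings_for_params_py := by
  intro params typed_objects type_hierarchy _
  unfold Spec_groundings_for_params_py groundings_for_params_py groundings_for_params_py_alt
  rw [pvGround_eq]
  have hmap : params.map (fun p => pvCompatB (pvAncMap type_hierarchy typed_objects) typed_objects p.2)
      = params.map (fun p => pvCompatible p.2 typed_objects type_hierarchy) := by
    apply List.map_congr_left
    intro p _
    exact (pvCompat_eq p.2 typed_objects type_hierarchy).symm
  rw [hmap, ← pvCandidates_product]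
  cases params with
  | nil => simp [pvCandidates, pvProduct, pvSubstFrom, PySem.Dict.empty]
  | cons p rest =>
    cases h : pvCandidates typed_objects type_hierarchy (p :: rest) with
    | none => simp
    | some cs => simp [List.map_map, Function.comp]
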